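-- pv_equiv track=rewrite | github.com/modelingevolution/zerobuffer | python/copy_and_fix_features.py | find_last_keyword
-- ===== SOURCE A (Python) =====
-- from typing import Optional, List, Tuple
--
-- def find_last_keyword(lines: List[str], current_index: int) -> str:
--     """Look backwards through lines to find the last Given/When/Then"""
--     for i in range(current_index - 1, -1, -1):
--         stripped = lines[i].strip()
--         if stripped.startswith('Given '):
--             return 'Given'
--         elif stripped.startswith('When '):
--             return 'When'
--         elif stripped.startswith('Then '):
--             return 'Then'
--     # If we can't find any, default to Given
--     return 'Given'
-- ===== SOURCE B (Python) =====
-- def find_last_keyword(lines, current_index):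
--     """Forward accumulator pass: the last keyword seen before current_index
--     is the nearest preceding one."""
--     result = 'Given'
--     for line in lines[:max(current_index, 0)]:
--         s = line.strip()
--         if s.startswith('Given '):
--             result = 'Given'
--         elif s.startswith('When '):
--             result = 'When'
--         elif s.startswith('Then '):
--             result = 'Then'
--     return result
-- ===== Notes on version B (the rewrite author's own statement) =====
-- stated objective: alternative
-- what changed: Replaces the backward index loop with early return by a single forward pass over the slice lines[:current_index] that keeps the last keyword seen in an accumulator (and never indexes out of range).
import Mathlib
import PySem

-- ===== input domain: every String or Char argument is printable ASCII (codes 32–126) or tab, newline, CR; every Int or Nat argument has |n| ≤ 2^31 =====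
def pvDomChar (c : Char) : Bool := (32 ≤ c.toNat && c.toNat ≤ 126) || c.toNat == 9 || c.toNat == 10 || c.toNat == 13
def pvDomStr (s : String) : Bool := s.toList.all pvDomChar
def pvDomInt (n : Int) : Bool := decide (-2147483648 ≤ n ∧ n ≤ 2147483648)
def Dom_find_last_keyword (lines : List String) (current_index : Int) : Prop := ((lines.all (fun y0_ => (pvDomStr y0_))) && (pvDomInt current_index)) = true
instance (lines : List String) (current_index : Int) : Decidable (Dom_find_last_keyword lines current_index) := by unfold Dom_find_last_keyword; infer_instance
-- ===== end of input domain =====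

-- B replaces A's backward index loop with early exit by one forward pass over
-- the prefix keeping the last keyword seen (alternative decomposition; same cost).

-- ===== PORT A =====
-- the backward for-loop with early returns, over range(current_index-1, -1, -1)
def pvGoA (lines : List String) : List Int → String
  | [] => "Given"
  | i :: rest =>
    match PySem.List.pyGet? lines i with
    | none => "Given"   -- lines[i] raises IndexError in Python; excluded by Pre_
    | some line =>
      let stripped := PySem.Str.strip line
      if PySem.Str.startswith stripped "Given " then "Given"
      else if PySem.Str.startswith stripped "When " then "When"
      else if PySem.Str.startswith stripped "Then " then "Then"
      else pvGoA lines rest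

def find_last_keyword (lines : List String) (current_index : Int) : String :=
  pvGoA lines (PySem.List.pyRange (current_index - 1) (-1) (-1))

-- ===== PORT B =====
def find_last_keyword_alt (lines : List String) (current_index : Int) : String :=
  (PySem.List.slice lines none (some (max current_index 0))).foldl
    (fun result line =>
      let s := PySem.Str.strip line
      if PySem.Str.startswith s "Given " then "Given"
      else if PySem.Str.startswith s "When " then "When"
      else if PySem.Str.startswith s "Then " then "Then"
      else result) "Given"

-- ===== PRECONDITION & SPEC =====
-- A raises IndexError as soon as current_index exceeds len(lines); only those inputs are excluded.
def Pre_find_last_keyword (lines : List String) (current_index : Int) : Prop :=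
  current_index ≤ (lines.length : Int)
instance (lines : List String) (current_index : Int) : Decidable (Pre_find_last_keyword lines current_index) := by unfold Pre_find_last_keyword; infer_instance

def pvWitness_find_last_keyword : List String × Int := (["Given x", "foo"], 2)

def Spec_find_last_keyword (lines : List String) (current_index : Int) (out : String) : Prop := out = find_last_keyword_alt lines current_index
instance (lines : List String) (current_index : Int) (out : String) : Decidable (Spec_find_last_keyword lines current_index out) := by unfold Spec_find_last_keyword; infer_instance

-- ===== CLAIM (what is proved, stated in full; the proofs are below) =====
def Claim_equal_find_last_keyword : Prop := ∀ (lines : List String) (current_index : Int), Dom_find_last_keyword lines current_index → Pre_find_last_keyword lines current_index → Spec_find_last_keyword lines current_index (find_last_keyword lines current_index)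

-- ===== LEMMAS AND PROOFS =====

-- the common per-line step of B's fold
def pvStep (result line : String) : String :=
  let s := PySem.Str.strip line
  if PySem.Str.startswith s "Given " then "Given"
  else if PySem.Str.startswith s "When " then "When"
  else if PySem.Str.startswith s "Then " then "Then"
  else result

lemma pvKey (lines : List String) : ∀ (n : Nat), n ≤ lines.length →
    pvGoA lines (PySem.List.pyRange ((n : Int) - 1) (-1) (-1)) =
      (lines.take n).foldl pvStep "Given" := by
  intro n
  induction n with
  | zero =>
    intro _
    rw [PySem.List.pyRange_neg_one_eq_nil (by omega)]
    simp [pvGoA]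
  | succ m ih =>
    intro h
    have hcast : ((m + 1 : Nat) : Int) - 1 = (m : Int) := by push_cast; ring
    rw [hcast, PySem.List.pyRange_neg_one_cons (by omega)]
    have hlt : m < lines.length := by omega
    have hget : PySem.List.pyGet? lines (m : Int) = some (lines[m]) :=
      PySem.List.pyGet?_ofNat lines m hlt
    have htake : lines.take (m + 1) = lines.take m ++ [lines[m]] :=
      List.take_succ_eq_append_getElem hlt  -- name checked below
    rw [htake, List.foldl_append]
    simp only [List.foldl_cons, List.foldl_nil]
    rw [show pvGoA lines ((m : Int) :: PySem.List.pyRange ((m : Int) - 1) (-1) (-1)) =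
        (match PySem.List.pyGet? lines (m : Int) with
         | none => "Given"
         | some line =>
           let stripped := PySem.Str.strip line
           if PySem.Str.startswith stripped "Given " then "Given"
           else if PySem.Str.startswith stripped "When " then "When"
           else if PySem.Str.startswith stripped "Then " then "Then"
           else pvGoA lines (PySem.List.pyRange ((m : Int) - 1) (-1) (-1))) from rfl]
    rw [hget]
    simp only [ih (by omega), pvStep]

-- B's fold is a fold of pvStep
lemma pvAltEq (lines : List String) (current_index : Int) :
    find_last_keyword_alt lines current_index =
      (PySem.List.slice lines none (some (max current_index 0))).foldl pvStep "Given" := rfl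

-- ===== VERDICT (by name: the statement is the Claim_ definition above) =====
theorem find_last_keyword_spec : Claim_equal_find_last_keyword := by
  intro lines ci _ hpre
  unfold Spec_find_last_keyword
  rw [pvAltEq]
  by_cases h : ci ≤ 0
  · have h1 : max ci 0 = 0 := by omega
    rw [h1]
    rw [show (0 : Int) = ((0 : Nat) : Int) from rfl, PySem.List.slice_to_natCast]
    unfold find_last_keyword
    rw [PySem.List.pyRange_neg_one_eq_nil (by omega)]
    simp [pvGoA]
  · have hn : ci = ((ci.toNat : Nat) : Int) := by omega
    have h1 : max ci 0 = ci := by omega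
    rw [h1, hn, PySem.List.slice_to_natCast]
    unfold find_last_keyword
    rw [hn]
    have hle : ci.toNat ≤ lines.length := by
      unfold Pre_find_last_keyword at hpre; omega
    exact pvKey lines ci.toNat hle
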